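-- pv_equiv track=rewrite | github.com/ttmgr/Tim_Reska | pipelines/wetland-surveillance/scripts/edna_taxonomy.py | parse_midori_header
-- ===== SOURCE A (Python) =====
-- def parse_midori_header(header: str) -> dict:
--     """Parse MIDORI2 database header for taxonomic information.
--
--     MIDORI2 headers contain taxonomy in the format:
--     >accession;tax=k:Animalia,p:Chordata,c:Aves,...,s:Species_name
--     """
--     info = {"kingdom": "", "phylum": "", "class": "", "order": "",
--             "family": "", "genus": "", "species": ""}
--
--     if "tax=" in header:
--         tax_str = header.split("tax=")[1]
--         for rank_entry in tax_str.split(","):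
--             if ":" in rank_entry:
--                 rank_code, name = rank_entry.split(":", 1)
--                 rank_map = {"k": "kingdom", "p": "phylum", "c": "class",
--                             "o": "order", "f": "family", "g": "genus",
--                             "s": "species"}
--                 if rank_code in rank_map:
--                     info[rank_map[rank_code]] = name.replace("_", " ")
--     return info
-- ===== SOURCE B (Python) =====
-- _RANK = {"k": "kingdom", "p": "phylum", "c": "class", "o": "order",
--          "f": "family", "g": "genus", "s": "species"}
--
--
-- def parse_midori_header(header: str) -> dict:
--     """Single character-level scan: instead of splitting on commas/colons and
--     calling str.replace, run a small state machine over the tax string (with a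
--     sentinel comma) that accumulates the rank code, switches to the name at the
--     first colon, translates underscores to spaces on the fly, and flushes each entry into
--     the result when its comma arrives (last occurrence wins)."""
--     info = dict.fromkeys(("kingdom", "phylum", "class", "order",
--                           "family", "genus", "species"), "")
--     if "tax=" in header:
--         code, name = "", None
--         for ch in header.split("tax=")[1] + ",":
--             if ch == ",":
--                 if name is not None and code in _RANK:
--                     info[_RANK[code]] = name
--                 code, name = "", None
--             elif name is None and ch == ":":
--                 name = ""
--             elif name is None:
--                 code += ch
--             else:
--                 name += " " if ch == "_" else ch
--     return info
-- ===== Notes on version B (the rewrite author's own statement) =====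
-- stated objective: alternative
-- what changed: B replaces A's comma-split / colon-split / str.replace pipeline by a single character-level state machine over the tax string (with a sentinel comma) that accumulates the rank code, switches to the name at the first colon, translates underscores to spaces character by character, and flushes each finished entry into the result dict.
import Mathlib
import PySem

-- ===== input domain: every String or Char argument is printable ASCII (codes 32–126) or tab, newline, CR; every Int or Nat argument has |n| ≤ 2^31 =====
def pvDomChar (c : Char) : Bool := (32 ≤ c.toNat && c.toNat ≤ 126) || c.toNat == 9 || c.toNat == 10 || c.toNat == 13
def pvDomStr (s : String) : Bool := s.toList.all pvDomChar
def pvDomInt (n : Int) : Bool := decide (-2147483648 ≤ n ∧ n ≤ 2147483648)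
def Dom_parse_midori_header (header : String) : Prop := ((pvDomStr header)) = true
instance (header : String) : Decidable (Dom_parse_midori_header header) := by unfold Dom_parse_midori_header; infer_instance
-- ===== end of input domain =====

-- B replaces A's comma/colon splitting and underscore replacement by a single character-level state machine over the tax string (alternative decomposition, same cost).

-- ===== PORT A =====
-- A-side helpers: the initial info dict, the rank_map dict literal, and the body of A's for-loop
-- (the Python locals rank_code / name are the two inlined `.getD` expressions: parts[0] and parts[1]).
def pvInfo0 : PySem.Dict String String := PySem.Dict.ofList
  [("kingdom", ""), ("phylum", ""), ("class", ""), ("order", ""),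
   ("family", ""), ("genus", ""), ("species", "")]

def pvRankMap : PySem.Dict String String := PySem.Dict.ofList
  [("k", "kingdom"), ("p", "phylum"), ("c", "class"),
   ("o", "order"), ("f", "family"), ("g", "genus"), ("s", "species")]

def pvStepA (info : PySem.Dict String String) (rank_entry : String) : PySem.Dict String String :=
  if PySem.Str.isIn ":" rank_entry then
    if pvRankMap.contains (((PySem.Str.splitMax? rank_entry ":" 1).getD []).getD 0 "") then
      info.insert (pvRankMap.getD (((PySem.Str.splitMax? rank_entry ":" 1).getD []).getD 0 "") "")
        (PySem.Str.replace (((PySem.Str.splitMax? rank_entry ":" 1).getD []).getD 1 "") "_" " ")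
    else info
  else info

def parse_midori_header (header : String) : List (String × String) :=
  if PySem.Str.isIn "tax=" header then
    (((PySem.Str.split?
        (PySem.List.pyGetD ((PySem.Str.split? header "tax=").getD []) 1 "") ",").getD
      []).foldl pvStepA pvInfo0).items
  else pvInfo0.items

-- ===== PORT B =====
-- B-side helpers: the result dict seeded by dict.fromkeys, the _RANK dict, the flush of one
-- finished entry (Source B's `if name is not None and code in _RANK: info[_RANK[code]] = name`),
-- and one step of the character state machine; a Python str being its list of characters,
-- the accumulators code/name are carried as List Char and materialised with String.ofList.
def pvInfo0B : PySem.Dict String String := PySem.Dict.ofList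
  [("kingdom", ""), ("phylum", ""), ("class", ""), ("order", ""),
   ("family", ""), ("genus", ""), ("species", "")]

def pvRankB : PySem.Dict String String := PySem.Dict.ofList
  [("k", "kingdom"), ("p", "phylum"), ("c", "class"),
   ("o", "order"), ("f", "family"), ("g", "genus"), ("s", "species")]

def pvFlushB (info : PySem.Dict String String) (code : List Char) (name : Option (List Char)) :
    PySem.Dict String String :=
  match name with
  | some nm =>
    if pvRankB.contains (String.ofList code) then
      info.insert (pvRankB.getD (String.ofList code) "") (String.ofList nm)
    else info
  | none => info

def pvStepM (st : PySem.Dict String String × List Char × Option (List Char)) (ch : Char) :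
    PySem.Dict String String × List Char × Option (List Char) :=
  if ch = ',' then (pvFlushB st.1 st.2.1 st.2.2, [], none)
  else if st.2.2 = none ∧ ch = ':' then (st.1, st.2.1, some [])
  else
    match st.2.2 with
    | none => (st.1, st.2.1 ++ [ch], none)
    | some nm => (st.1, st.2.1, some (nm ++ [if ch = '_' then ' ' else ch]))

def parse_midori_header_alt (header : String) : List (String × String) :=
  if PySem.Str.isIn "tax=" header then
    (List.foldl pvStepM (pvInfo0B, [], none)
      ((PySem.List.pyGetD ((PySem.Str.split? header "tax=").getD []) 1 "").toList ++ [','])).1.items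
  else pvInfo0B.items

-- ===== PRECONDITION & SPEC =====
def Spec_parse_midori_header (header : String) (out : List (String × String)) : Prop := out = parse_midori_header_alt header
instance (header : String) (out : List (String × String)) : Decidable (Spec_parse_midori_header header out) := by unfold Spec_parse_midori_header; infer_instance

-- ===== CLAIM (what is proved, stated in full; the proofs are below) =====
def Claim_equal_parse_midori_header : Prop := ∀ (header : String), Dom_parse_midori_header header → Spec_parse_midori_header header (parse_midori_header header)

-- ===== LEMMAS AND PROOFS =====

-- the underscore-to-space translation Source B applies character by character
def pvRepl (c : Char) : Char := if c = '_' then ' ' else c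

-- structural form of s.split(",")
def pvSplitC : List Char → List Char → List (List Char)
  | pre, [] => [pre]
  | pre, c :: t => if c = ',' then pre :: pvSplitC [] t else pvSplitC (pre ++ [c]) t

-- structural form of s.split(":", 1)
def pvSplitC1 : List Char → List Char → List (List Char)
  | pre, [] => [pre]
  | pre, c :: t => if c = ':' then [pre, t] else pvSplitC1 (pre ++ [c]) t

lemma go_comma : ∀ (fuel : Nat) (l cur : List Char) (acc : List (List Char)), l.length ≤ fuel →
    PySem.Chars.splitOn.go [','] fuel l cur acc = acc.reverse ++ pvSplitC cur.reverse l := by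
  intro fuel
  induction fuel with
  | zero =>
    intro l cur acc h
    have : l = [] := List.eq_nil_of_length_eq_zero (by omega)
    subst this
    simp [PySem.Chars.splitOn.go, pvSplitC]
  | succ f ih =>
    intro l cur acc h
    cases l with
    | nil => simp [PySem.Chars.splitOn.go, pvSplitC]
    | cons c rest =>
      by_cases hc : c = ','
      · subst hc
        rw [show PySem.Chars.splitOn.go [','] (f+1) (','::rest) cur acc
            = PySem.Chars.splitOn.go [','] f rest [] (cur.reverse :: acc) by
          simp [PySem.Chars.splitOn.go, List.isPrefixOf]]
        rw [ih rest [] (cur.reverse :: acc) (by simp at h ⊢; omega)]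
        simp [pvSplitC]
      · rw [show PySem.Chars.splitOn.go [','] (f+1) (c::rest) cur acc
            = PySem.Chars.splitOn.go [','] f rest (c :: cur) acc by
          simp [PySem.Chars.splitOn.go, List.isPrefixOf, show ¬(',' = c) from fun h => hc h.symm]]
        rw [ih rest (c :: cur) acc (by simp at h ⊢; omega)]
        simp [pvSplitC, hc]

lemma splitOn_comma (l : List Char) : PySem.Chars.splitOn l [','] = pvSplitC [] l := by
  unfold PySem.Chars.splitOn
  rw [go_comma (l.length + 1) l [] [] (by omega)]
  simp

lemma go_colon_zero : ∀ (fuel : Nat) (l cur : List Char) (acc : List (List Char)), l.length ≤ fuel →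
    PySem.Chars.splitOnMax.go [':'] fuel 0 l cur acc = acc.reverse ++ [cur.reverse ++ l] := by
  intro fuel
  cases fuel with
  | zero =>
    intro l cur acc h
    have : l = [] := List.eq_nil_of_length_eq_zero (by omega)
    subst this
    simp [PySem.Chars.splitOnMax.go]
  | succ f =>
    intro l cur acc h
    cases l with
    | nil => simp [PySem.Chars.splitOnMax.go]
    | cons c rest => simp [PySem.Chars.splitOnMax.go]

lemma go_colon : ∀ (fuel : Nat) (l cur : List Char) (acc : List (List Char)), l.length ≤ fuel →
    PySem.Chars.splitOnMax.go [':'] fuel 1 l cur acc = acc.reverse ++ pvSplitC1 cur.reverse l := by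
  intro fuel
  induction fuel with
  | zero =>
    intro l cur acc h
    have : l = [] := List.eq_nil_of_length_eq_zero (by omega)
    subst this
    simp [PySem.Chars.splitOnMax.go, pvSplitC1]
  | succ f ih =>
    intro l cur acc h
    cases l with
    | nil => simp [PySem.Chars.splitOnMax.go, pvSplitC1]
    | cons c rest =>
      by_cases hc : c = ':'
      · subst hc
        rw [show PySem.Chars.splitOnMax.go [':'] (f+1) 1 (':'::rest) cur acc
            = PySem.Chars.splitOnMax.go [':'] f 0 rest [] (cur.reverse :: acc) by
          simp [PySem.Chars.splitOnMax.go, List.isPrefixOf]]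
        rw [go_colon_zero f rest [] (cur.reverse :: acc) (by simp at h ⊢; omega)]
        simp [pvSplitC1]
      · rw [show PySem.Chars.splitOnMax.go [':'] (f+1) 1 (c::rest) cur acc
            = PySem.Chars.splitOnMax.go [':'] f 1 rest (c :: cur) acc by
          simp [PySem.Chars.splitOnMax.go, List.isPrefixOf, show ¬(':' = c) from fun h => hc h.symm]]
        rw [ih rest (c :: cur) acc (by simp at h ⊢; omega)]
        simp [pvSplitC1, hc]

lemma splitColon1 (l : List Char) : PySem.Chars.splitOnMax l [':'] 1 = pvSplitC1 [] l := by
  unfold PySem.Chars.splitOnMax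
  rw [if_neg (by omega)]
  rw [show ((1 : Int).toNat) = 1 from rfl]
  rw [go_colon (l.length + 1) l [] [] (by omega)]
  simp

lemma go_replace : ∀ (fuel : Nat) (l acc : List Char), l.length ≤ fuel →
    PySem.Chars.replace.go ['_'] [' '] fuel l acc = acc.reverse ++ l.map pvRepl := by
  intro fuel
  induction fuel with
  | zero =>
    intro l acc h
    have : l = [] := List.eq_nil_of_length_eq_zero (by omega)
    subst this
    simp [PySem.Chars.replace.go]
  | succ f ih =>
    intro l acc h
    cases l with
    | nil => simp [PySem.Chars.replace.go]
    | cons c rest =>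
      by_cases hc : c = '_'
      · subst hc
        rw [show PySem.Chars.replace.go ['_'] [' '] (f+1) ('_'::rest) acc
            = PySem.Chars.replace.go ['_'] [' '] f rest (' ' :: acc) by
          simp [PySem.Chars.replace.go, List.isPrefixOf]]
        rw [ih rest (' ' :: acc) (by simp at h ⊢; omega)]
        simp [pvRepl]
      · rw [show PySem.Chars.replace.go ['_'] [' '] (f+1) (c::rest) acc
            = PySem.Chars.replace.go ['_'] [' '] f rest (c :: acc) by
          simp [PySem.Chars.replace.go, List.isPrefixOf, show ¬('_' = c) from fun h => hc h.symm]]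
        rw [ih rest (c :: acc) (by simp at h ⊢; omega)]
        simp [pvRepl, hc]

lemma replace_underscore (l : List Char) :
    PySem.Chars.replace l ['_'] [' '] = l.map pvRepl := by
  unfold PySem.Chars.replace
  rw [if_neg (by simp)]
  rw [go_replace l.length l [] le_rfl]
  simp

lemma runSome (es : List Char) : ∀ (info : PySem.Dict String String) (code nm : List Char),
    ',' ∉ es →
    List.foldl pvStepM (info, code, some nm) es = (info, code, some (nm ++ es.map pvRepl)) := by
  induction es with
  | nil => intro info code nm _; simp
  | cons c t ih =>
    intro info code nm h
    have hc : ¬ c = ',' := fun hh => h (by simp [hh])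
    have ht : ',' ∉ t := fun hh => h (by simp [hh])
    rw [List.foldl_cons,
      show pvStepM (info, code, some nm) c = (info, code, some (nm ++ [pvRepl c])) by
        simp [pvStepM, hc, pvRepl]]
    rw [ih info code (nm ++ [pvRepl c]) ht]
    simp

lemma runNone (es : List Char) : ∀ (info : PySem.Dict String String) (code : List Char),
    ',' ∉ es →
    List.foldl pvStepM (info, code, none) es =
      if ':' ∈ es then
        (info, code ++ es.takeWhile (· ≠ ':'), some (((es.dropWhile (· ≠ ':')).tail).map pvRepl))
      else (info, code ++ es, none) := by
  induction es with
  | nil => intro info code _; simp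
  | cons c t ih =>
    intro info code h
    have hc : ¬ c = ',' := fun hh => h (by simp [hh])
    have ht : ',' ∉ t := fun hh => h (by simp [hh])
    by_cases hcol : c = ':'
    · subst hcol
      rw [List.foldl_cons,
        show pvStepM (info, code, none) ':' = (info, code, some []) by simp [pvStepM, hc]]
      rw [runSome t info code [] ht]
      simp
    · rw [List.foldl_cons,
        show pvStepM (info, code, none) c = (info, code ++ [c], none) by
          simp [pvStepM, hc, hcol]]
      rw [ih info (code ++ [c]) ht]
      by_cases hmem : ':' ∈ t
      · rw [if_pos hmem, if_pos (by simp [hmem])]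
        simp [hcol]
      · rw [if_neg hmem, if_neg (by simp [hmem, show ¬(':' = c) from fun hh => hcol hh.symm])]
        simp

lemma pvSplitC1_eq (es : List Char) : ∀ code : List Char,
    pvSplitC1 code es =
      if ':' ∈ es then [code ++ es.takeWhile (· ≠ ':'), (es.dropWhile (· ≠ ':')).tail]
      else [code ++ es] := by
  induction es with
  | nil => intro code; simp [pvSplitC1]
  | cons c t ih =>
    intro code
    by_cases hcol : c = ':'
    · subst hcol
      simp [pvSplitC1]
    · rw [show pvSplitC1 code (c :: t) = pvSplitC1 (code ++ [c]) t by simp [pvSplitC1, hcol]]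
      rw [ih (code ++ [c])]
      by_cases hmem : ':' ∈ t
      · rw [if_pos hmem, if_pos (by simp [hmem])]
        simp [hcol]
      · rw [if_neg hmem, if_neg (by simp [hmem, show ¬(':' = c) from fun hh => hcol hh.symm])]
        simp

lemma pvRankB_eq : pvRankB = pvRankMap := rfl

lemma strIsIn_colon_pos (l : List Char) (h : ':' ∈ l) :
    PySem.Str.isIn ":" (String.ofList l) = true := by
  simp [PySem.Str.isIn]
  rw [PySem.Chars.isIn_iff_infix, List.singleton_infix_iff]
  exact h

lemma strIsIn_colon_neg (l : List Char) (h : ':' ∉ l) :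
    PySem.Str.isIn ":" (String.ofList l) = false := by
  simp [PySem.Str.isIn]
  rw [PySem.Chars.isIn_eq_false_iff, List.singleton_infix_iff]
  exact h

lemma strSplitMax_colon (l : List Char) :
    PySem.Str.splitMax? (String.ofList l) ":" 1
      = some (List.map String.ofList (pvSplitC1 [] l)) := by
  unfold PySem.Str.splitMax? PySem.Chars.splitMax?
  simp [splitColon1]

lemma strReplace_underscore (l : List Char) :
    PySem.Str.replace (String.ofList l) "_" " " = String.ofList (l.map pvRepl) := by
  unfold PySem.Str.replace
  rw [String.toList_ofList, show ("_".toList) = ['_'] from rfl,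
    show (" ".toList) = [' '] from rfl, replace_underscore]

-- A's per-entry step in closed form (the entry given as its character list)
lemma stepA_char (entry : List Char) (info : PySem.Dict String String) :
    pvStepA info (String.ofList entry) =
      if ':' ∈ entry then
        (if pvRankMap.contains (String.ofList (entry.takeWhile (· ≠ ':'))) then
          info.insert (pvRankMap.getD (String.ofList (entry.takeWhile (· ≠ ':'))) "")
            (String.ofList (((entry.dropWhile (· ≠ ':')).tail).map pvRepl))
        else info)
      else info := by
  unfold pvStepA
  by_cases hm : ':' ∈ entry
  · rw [if_pos (strIsIn_colon_pos entry hm), if_pos hm]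
    rw [strSplitMax_colon, pvSplitC1_eq entry [], if_pos hm]
    simp only [Option.getD_some, List.map_cons, List.map_nil, List.nil_append]
    rw [show ∀ a b : String, ([a, b] : List String).getD 0 "" = a from fun a b => rfl]
    rw [show ∀ a b : String, ([a, b] : List String).getD 1 "" = b from fun a b => rfl]
    rw [strReplace_underscore]
  · rw [if_neg (by rw [strIsIn_colon_neg entry hm]; simp), if_neg hm]

lemma entryStep (es : List Char) (info : PySem.Dict String String) (code : List Char)
    (hc : ',' ∉ es) (hcc : ':' ∉ code) :
    List.foldl pvStepM (info, code, none) (es ++ [','])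
      = (pvStepA info (String.ofList (code ++ es)), [], none) := by
  have hcodeAll : ∀ a ∈ code, (fun x => decide (x ≠ ':')) a = true :=
    fun a ha => decide_eq_true (fun hh => hcc (hh ▸ ha))
  rw [List.foldl_append, runNone es info code hc, stepA_char]
  by_cases hmem : ':' ∈ es
  · rw [if_pos hmem, if_pos (by simp [hmem])]
    rw [List.foldl_cons, List.foldl_nil,
      show ∀ (d : PySem.Dict String String) (cd nm : List Char),
          pvStepM (d, cd, some nm) ',' = (pvFlushB d cd (some nm), [], none) from
        fun d cd nm => by simp [pvStepM]]
    rw [List.takeWhile_append_of_pos hcodeAll, List.dropWhile_append_of_pos hcodeAll]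
    unfold pvFlushB
    rw [pvRankB_eq]
  · rw [if_neg hmem, if_neg (by simp [hmem, hcc])]
    rw [List.foldl_cons, List.foldl_nil,
      show pvStepM (info, code ++ es, none) ',' = (pvFlushB info (code ++ es) none, [], none) by
        simp [pvStepM]]
    rfl

lemma pvSplitC_no_comma (es : List Char) : ∀ pre : List Char, ',' ∉ es →
    pvSplitC pre es = [pre ++ es] := by
  induction es with
  | nil => intro pre _; simp [pvSplitC]
  | cons c t ih =>
    intro pre h
    have hc : ¬ c = ',' := fun hh => h (by simp [hh])
    rw [show pvSplitC pre (c :: t) = pvSplitC (pre ++ [c]) t by simp [pvSplitC, hc]]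
    rw [ih (pre ++ [c]) (fun hh => h (by simp [hh]))]
    simp

lemma pvSplitC_first (es : List Char) : ∀ (pre t : List Char), ',' ∉ es →
    pvSplitC pre (es ++ ',' :: t) = (pre ++ es) :: pvSplitC [] t := by
  induction es with
  | nil => intro pre t _; simp [pvSplitC]
  | cons c r ih =>
    intro pre t h
    have hc : ¬ c = ',' := fun hh => h (by simp [hh])
    rw [List.cons_append,
      show pvSplitC pre (c :: (r ++ ',' :: t)) = pvSplitC (pre ++ [c]) (r ++ ',' :: t) by
        simp [pvSplitC, hc]]
    rw [ih (pre ++ [c]) t (fun hh => h (by simp [hh]))]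
    simp

lemma firstComma (cs : List Char) (h : ',' ∈ cs) :
    ∃ es rest : List Char, cs = es ++ ',' :: rest ∧ ',' ∉ es := by
  induction cs with
  | nil => simp at h
  | cons c t ih =>
    by_cases hc : c = ','
    · exact ⟨[], t, by rw [hc]; rfl, by simp⟩
    · have ht : ',' ∈ t := by
        rcases List.mem_cons.mp h with h1 | h1
        · exact absurd h1.symm hc
        · exact h1
      obtain ⟨es, rest, hd, hn⟩ := ih ht
      exact ⟨c :: es, rest, by rw [hd]; rfl, by
        intro hh
        rcases List.mem_cons.mp hh with h1 | h1
        · exact hc h1.symm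
        · exact hn h1⟩

lemma machineMain : ∀ (n : Nat) (cs : List Char), cs.length ≤ n →
    ∀ info : PySem.Dict String String,
    (List.foldl pvStepM (info, [], none) (cs ++ [','])).1
      = List.foldl pvStepA info ((pvSplitC [] cs).map String.ofList) := by
  intro n
  induction n with
  | zero =>
    intro cs h info
    have : cs = [] := List.eq_nil_of_length_eq_zero (by omega)
    subst this
    rw [entryStep [] info [] (by simp) (by simp)]
    simp [pvSplitC]
  | succ m ih =>
    intro cs h info
    by_cases hmem : ',' ∈ cs
    · obtain ⟨es, rest, rfl, hces⟩ := firstComma cs hmem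
      have hlen : rest.length ≤ m := by simp at h; omega
      rw [show (es ++ ',' :: rest) ++ [','] = (es ++ [',']) ++ (rest ++ [',']) by simp]
      rw [List.foldl_append, entryStep es info [] hces (by simp)]
      rw [ih rest hlen (pvStepA info (String.ofList ([] ++ es)))]
      rw [pvSplitC_first es [] rest hces]
      simp
    · rw [entryStep cs info [] hmem (by simp)]
      rw [pvSplitC_no_comma cs [] hmem]
      simp

-- ===== VERDICT (by name: the statement is the Claim_ definition above) =====
theorem parse_midori_header_spec : Claim_equal_parse_midori_header := by
  intro header _
  unfold Spec_parse_midori_header parse_midori_header parse_midori_header_alt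
  by_cases hin : PySem.Str.isIn "tax=" header = true
  · rw [if_pos hin, if_pos hin]
    set tax := PySem.List.pyGetD ((PySem.Str.split? header "tax=").getD []) 1 "" with htax
    have hent : (PySem.Str.split? tax ",").getD [] = (pvSplitC [] tax.toList).map String.ofList := by
      unfold PySem.Str.split? PySem.Chars.split?
      rw [show (",".toList) = [','] from rfl, if_neg (by simp)]
      rw [splitOn_comma]
      rfl
    rw [hent, show pvInfo0B = pvInfo0 from rfl]
    exact congrArg PySem.Dict.items (machineMain tax.toList.length tax.toList le_rfl pvInfo0).symm
  · rw [if_neg hin, if_neg hin]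
    rfl
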